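-- pv_equiv track=rewrite | github.com/ABHISHEK1139/IND-Diplomat | Core/legal/legal_splitter.py | _get_parent_at
-- ===== SOURCE A (Python) =====
-- from typing import Dict, List, Optional, Tuple
--
-- def _get_parent_at(position: int, parent_map: Dict[int, str]) -> str:
--     """Get the parent heading active at a given character position."""
--     best = ""
--     for pos, heading in sorted(parent_map.items()):
--         if pos <= position:
--             best = heading
--         else:
--             break
--     return best
-- ===== SOURCE B (Python) =====
-- def _get_parent_at(position: int, parent_map: dict) -> str:
--     """Get the parent heading active at a given character position.
--
--     Single linear pass: track the largest key <= position seen so far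
--     (no sorting needed)."""
--     best_pos = None
--     best = ""
--     for pos, heading in parent_map.items():
--         if pos <= position and (best_pos is None or best_pos <= pos):
--             best_pos = pos
--             best = heading
--     return best
-- ===== Notes on version B (the rewrite author's own statement) =====
-- stated objective: faster
-- what changed: Replaces sort-then-scan-with-break by a single linear pass that tracks the maximal key <= position and its heading.
import Mathlib
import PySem

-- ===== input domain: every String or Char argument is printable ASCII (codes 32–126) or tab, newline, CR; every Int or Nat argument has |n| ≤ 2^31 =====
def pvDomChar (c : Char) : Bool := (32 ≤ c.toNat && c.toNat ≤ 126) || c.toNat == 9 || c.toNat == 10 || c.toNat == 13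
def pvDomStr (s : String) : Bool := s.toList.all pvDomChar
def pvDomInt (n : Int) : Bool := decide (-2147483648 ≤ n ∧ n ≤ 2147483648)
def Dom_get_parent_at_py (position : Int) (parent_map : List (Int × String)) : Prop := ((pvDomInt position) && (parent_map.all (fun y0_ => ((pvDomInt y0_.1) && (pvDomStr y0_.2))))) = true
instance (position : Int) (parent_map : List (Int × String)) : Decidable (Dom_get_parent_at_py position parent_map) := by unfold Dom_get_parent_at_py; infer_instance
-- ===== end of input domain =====

-- B is one linear pass tracking the maximal key ≤ position, instead of A's sort followed by a scan with break.

-- ===== PORT A =====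
-- loop 'for pos, heading in sorted(parent_map.items()): if pos <= position: best = heading else: break'
def goA_get_parent_at (position : Int) : List (Int × String) → String → String
  | [], best => best
  | (pos, h) :: rest, best =>
    if pos ≤ position then goA_get_parent_at position rest h else best

-- sorted(parent_map.items()) compares tuples; since parent_map is a dict its keys are
-- distinct (Pre_ below), so sorting by the key alone is exact.
def get_parent_at_py (position : Int) (parent_map : List (Int × String)) : String :=
  goA_get_parent_at position (PySem.List.sorted parent_map (fun p => p.1) false) ""

-- ===== PORT B =====
-- 'if pos <= position and (best_pos is None or best_pos <= pos): best_pos, best = pos, heading'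
def stepB_get_parent_at (position : Int) (s : Option Int × String) (e : Int × String) : Option Int × String :=
  if decide (e.1 ≤ position) && s.1.elim true (fun b => decide (b ≤ e.1)) then (some e.1, e.2) else s

def get_parent_at_py_alt (position : Int) (parent_map : List (Int × String)) : String :=
  (parent_map.foldl (stepB_get_parent_at position) (none, "")).2

-- ===== PRECONDITION & SPEC =====
-- parent_map stands for a Python dict, whose keys are necessarily distinct; Pre_ excludes
-- association lists with duplicate keys, which do not represent any Python dict input.
def Pre_get_parent_at_py (position : Int) (parent_map : List (Int × String)) : Prop :=
  (parent_map.map Prod.fst).Nodup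
instance (position : Int) (parent_map : List (Int × String)) : Decidable (Pre_get_parent_at_py position parent_map) := by unfold Pre_get_parent_at_py; infer_instance

def pvWitness_get_parent_at_py : Int × (List (Int × String)) := (5, [(7, "late"), (0, "intro"), (3, "middle")])

def Spec_get_parent_at_py (position : Int) (parent_map : List (Int × String)) (out : String) : Prop := out = get_parent_at_py_alt position parent_map
instance (position : Int) (parent_map : List (Int × String)) (out : String) : Decidable (Spec_get_parent_at_py position parent_map out) := by unfold Spec_get_parent_at_py; infer_instance

-- ===== CLAIM (what is proved, stated in full; the proofs are below) =====
def Claim_equal_get_parent_at_py : Prop := ∀ (position : Int) (parent_map : List (Int × String)), Dom_get_parent_at_py position parent_map → Pre_get_parent_at_py position parent_map → Spec_get_parent_at_py position parent_map (get_parent_at_py position parent_map)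

-- ===== LEMMAS AND PROOFS =====

-- B's step is commutative on elements with distinct keys (or equal elements).
lemma stepB_comm (position : Int) (x y : Int × String) (hxy : x.1 ≠ y.1 ∨ x = y)
    (z : Option Int × String) :
    stepB_get_parent_at position (stepB_get_parent_at position z x) y
      = stepB_get_parent_at position (stepB_get_parent_at position z y) x := by
  rcases hxy with hxy | rfl
  · rcases z with ⟨bp, best⟩
    rcases x with ⟨xk, xh⟩; rcases y with ⟨yk, yh⟩
    rcases bp with _ | b <;>
      simp only [stepB_get_parent_at, Option.elim, Bool.and_eq_true, decide_eq_true_eq] <;>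
      split_ifs <;> simp_all <;> omega
  · rfl

-- folding B's step over a list whose keys all exceed position leaves the state unchanged
lemma foldl_stepB_skip (position : Int) (l : List (Int × String)) (s : Option Int × String)
    (h : ∀ e ∈ l, position < e.1) :
    l.foldl (stepB_get_parent_at position) s = s := by
  induction l generalizing s with
  | nil => rfl
  | cons e rest ih =>
    have he := h e (List.mem_cons_self)
    have : stepB_get_parent_at position s e = s := by
      simp only [stepB_get_parent_at]
      have : ¬ e.1 ≤ position := by omega
      simp [this]
    simp only [List.foldl_cons, this]
    exact ih _ (fun e' h' => h e' (List.mem_cons_of_mem _ h'))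

-- on a key-sorted list, A's scan-with-break equals B's fold
lemma goA_eq_foldl (position : Int) (l : List (Int × String))
    (hs : l.Pairwise (fun a b => a.1 ≤ b.1)) (bp : Option Int) (best : String)
    (hbp : ∀ e ∈ l, bp.elim True (fun b => b ≤ e.1)) :
    goA_get_parent_at position l best = (l.foldl (stepB_get_parent_at position) (bp, best)).2 := by
  induction l generalizing bp best with
  | nil => rfl
  | cons e rest ih =>
    rcases e with ⟨pos, h⟩
    obtain ⟨hhead, hrest⟩ := List.pairwise_cons.mp hs
    by_cases hle : pos ≤ position
    · have hcond : (decide (pos ≤ position) && bp.elim true (fun b => decide (b ≤ pos))) = true := by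
        have := hbp (pos, h) (List.mem_cons_self)
        rcases bp with _ | b <;> simp_all [Option.elim]
      simp only [goA_get_parent_at, if_pos hle, List.foldl_cons, stepB_get_parent_at, hcond,
        if_true]
      exact ih hrest (some pos) h (fun e' h' => hhead e' h')
    · have hcond : (decide (pos ≤ position) && bp.elim true (fun b => decide (b ≤ pos))) = false := by
        simp [hle]
      simp only [goA_get_parent_at, if_neg hle, List.foldl_cons, stepB_get_parent_at, hcond]
      rw [if_neg (by simp), foldl_stepB_skip]
      intro e' h'
      have := hhead e' h'
      omega

-- ===== VERDICT (by name: the statement is the Claim_ definition above) =====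
theorem get_parent_at_py_spec : Claim_equal_get_parent_at_py := by
  intro position parent_map _ hpre
  unfold Spec_get_parent_at_py get_parent_at_py get_parent_at_py_alt
  set l := PySem.List.sorted parent_map (fun p => p.1) false with hl
  have hperm : l.Perm parent_map := PySem.List.sorted_perm _ _ _
  have hs : l.Pairwise (fun a b => a.1 ≤ b.1) := PySem.List.sorted_pairwise _ _
  have hnodup : (l.map Prod.fst).Nodup :=
    (hperm.map Prod.fst).nodup_iff.mpr hpre
  have hcomm : ∀ x ∈ l, ∀ y ∈ l, ∀ z,
      stepB_get_parent_at position (stepB_get_parent_at position z x) y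
        = stepB_get_parent_at position (stepB_get_parent_at position z y) x := by
    intro x hx y hy z
    apply stepB_comm
    by_cases hxy : x = y
    · exact Or.inr hxy
    · left
      intro hk
      exact hxy (List.inj_on_of_nodup_map hnodup hx hy hk)
  have hfold : l.foldl (stepB_get_parent_at position) (none, "")
      = parent_map.foldl (stepB_get_parent_at position) (none, "") :=
    hperm.foldl_eq' hcomm _
  rw [← hfold]
  exact goA_eq_foldl position l hs none "" (fun e _ => trivial)
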